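-- pv_equiv track=rewrite | github.com/marmote/marmote | tools/Analysis/helperfuncs/BestBasis.py | BestBasis_rec
-- ===== SOURCE A (Python) =====
-- def BestBasis_rec(cost, level = 0, stop_level = None, item = 0) :
--     val = cost[level][item]
--     ret_levels = [level]
--     ret_items = [item]
--
--     if stop_level is None :
--         stop_level = len(cost)-1
--     else :
--         stop_level = min(len(cost)-1, stop_level)
--
--     if level >= stop_level:
--         return val, ret_levels, ret_items
--
--     left_val, left_levels, left_items = BestBasis_rec(cost, level+1, stop_level, 2*item)
--     right_val, right_levels, right_items = BestBasis_rec(cost, level+1, stop_level, 2*item+1)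
--
--     if left_val + right_val > val :
--         val = left_val + right_val
--         ret_levels = left_levels + right_levels
--         ret_items = left_items + right_items
--
--     return val, ret_levels, ret_items
-- ===== SOURCE B (Python) =====
-- def BestBasis_rec(cost, level = 0, stop_level = None, item = 0):
--     # Bottom-up level-synchronous table instead of top-down binary recursion.
--     n = len(cost)
--     stop = n - 1 if stop_level is None else min(n - 1, stop_level)
--     if level >= stop:
--         return cost[level][item], [level], [item]
--
--     def row(L):
--         if L >= stop:
--             e = stop - level
--             base = 2 ** e * item
--             return [(cost[stop][base + k], [stop], [base + k]) for k in range(2 ** e)]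
--         below = row(L + 1)
--         e = L - level
--         base = 2 ** e * item
--         out = []
--         for j in range(len(below) // 2):
--             lv, ll, li = below[2 * j]
--             rv, rl, ri = below[2 * j + 1]
--             c = cost[L][base + j]
--             if lv + rv > c:
--                 out.append((lv + rv, ll + rl, li + ri))
--             else:
--                 out.append((c, [L], [base + j]))
--         return out
--
--     v, ls, its = row(level)[0]
--     return v, ls, its
-- ===== Notes on version B (the rewrite author's own statement) =====
-- stated objective: alternative
-- what changed: Replaces A's top-down binary recursion over tree nodes by a bottom-up dynamic-programming pass that builds whole rows of node entries at the clamped stop level and combines them pairwise upward to the root.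
import Mathlib
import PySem

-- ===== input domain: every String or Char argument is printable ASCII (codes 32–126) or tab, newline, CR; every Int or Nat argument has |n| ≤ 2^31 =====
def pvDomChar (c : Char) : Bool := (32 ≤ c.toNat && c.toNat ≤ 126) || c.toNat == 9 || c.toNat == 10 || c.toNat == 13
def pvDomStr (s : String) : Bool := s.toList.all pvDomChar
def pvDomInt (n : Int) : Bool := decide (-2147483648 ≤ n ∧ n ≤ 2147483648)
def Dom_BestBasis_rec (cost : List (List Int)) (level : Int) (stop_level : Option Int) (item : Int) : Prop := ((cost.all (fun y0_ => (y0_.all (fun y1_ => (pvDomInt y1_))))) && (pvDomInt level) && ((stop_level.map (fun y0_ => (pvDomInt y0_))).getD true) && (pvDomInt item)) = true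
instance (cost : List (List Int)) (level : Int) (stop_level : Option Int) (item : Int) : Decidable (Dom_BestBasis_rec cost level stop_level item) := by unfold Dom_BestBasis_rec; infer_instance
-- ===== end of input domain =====

-- B replaces A's top-down binary recursion by a bottom-up level-synchronous table (rows of
-- node entries combined pairwise upward); same cost, different decomposition (objective: alternative).

-- cost[L][idx] read under Python index semantics; default 0 is only reached outside Pre_.
def pvCell (cost : List (List Int)) (L idx : Int) : Int :=
  ((PySem.List.pyGet? cost L).bind (fun row => PySem.List.pyGet? row idx)).getD 0

-- ===== PORT A =====
def BestBasis_rec (cost : List (List Int)) (level : Int) (stop_level : Option Int) (item : Int) : Int × List Int × List Int :=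
  let val := pvCell cost level item
  let stop : Int := match stop_level with
    | none => (cost.length : Int) - 1
    | some s => min ((cost.length : Int) - 1) s
  if level ≥ stop then (val, [level], [item])
  else
    let l := BestBasis_rec cost (level + 1) (some stop) (2 * item)
    let r := BestBasis_rec cost (level + 1) (some stop) (2 * item + 1)
    if l.1 + r.1 > val then (l.1 + r.1, l.2.1 ++ r.2.1, l.2.2 ++ r.2.2)
    else (val, [level], [item])
termination_by ((match stop_level with
    | none => (cost.length : Int) - 1
    | some s => min ((cost.length : Int) - 1) s) - level).toNat
decreasing_by all_goals omega

-- ===== PORT B =====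
def pvRow (cost : List (List Int)) (level item stop : Int) (L : Int) : List (Int × List Int × List Int) :=
  if L ≥ stop then
    let e := (stop - level).toNat
    let base := 2 ^ e * item
    (List.range (2 ^ e)).map (fun (k : Nat) => (pvCell cost stop (base + (k : Int)), [stop], [base + (k : Int)]))
  else
    let below := pvRow cost level item stop (L + 1)
    let e := (L - level).toNat
    let base := 2 ^ e * item
    (List.range (below.length / 2)).map (fun j =>
      let lt := below.getD (2 * j) (0, [], [])
      let rt := below.getD (2 * j + 1) (0, [], [])
      let c := pvCell cost L (base + (j : Int))
      if lt.1 + rt.1 > c then (lt.1 + rt.1, lt.2.1 ++ rt.2.1, lt.2.2 ++ rt.2.2)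
      else (c, [L], [base + (j : Int)]))
termination_by (stop - L).toNat
decreasing_by omega

def BestBasis_rec_alt (cost : List (List Int)) (level : Int) (stop_level : Option Int) (item : Int) : Int × List Int × List Int :=
  let stop : Int := match stop_level with
    | none => (cost.length : Int) - 1
    | some s => min ((cost.length : Int) - 1) s
  if level ≥ stop then (pvCell cost level item, [level], [item])
  else (pvRow cost level item stop level).headD (0, [], [])

-- ===== PRECONDITION & SPEC =====
-- cost[L][idx] is a valid Python (possibly negative) index pair: L into cost, idx into that row
def pvCellOK (cost : List (List Int)) (L idx : Int) : Prop :=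
  PySem.Raise.InRange cost.length L ∧
  PySem.Raise.InRange ((PySem.List.pyGet? cost L).getD []).length idx

-- Pre_ excludes exactly the inputs where A raises IndexError: every tree node it visits (levels
-- level..stop, the 2^e node indices of relative depth e) must be a valid index pair.  The first
-- conjunct of the recursive branch (the 2^depth leaf indices fit in the stop row, i.e.
-- depth ≤ log2 of twice its length) is implied by the leaf checks; it is stated up front and
-- folded into the quantifier bound via 'min' so the bounded quantifier stays small to decide.
def Pre_BestBasis_rec (cost : List (List Int)) (level : Int) (stop_level : Option Int) (item : Int) : Prop :=
  let stop : Int := match stop_level with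
    | none => (cost.length : Int) - 1
    | some s => min ((cost.length : Int) - 1) s
  if level ≥ stop then pvCellOK cost level item
  else
    (stop - level).toNat ≤ Nat.log2 (2 * ((PySem.List.pyGet? cost stop).getD []).length) ∧
    ∀ e ∈ List.range (min ((stop - level).toNat + 1)
        (Nat.log2 (2 * ((PySem.List.pyGet? cost stop).getD []).length) + 1)),
      ∀ k ∈ List.range (2 ^ e),
        pvCellOK cost (level + (e : Int)) (2 ^ e * item + (k : Int))

instance (cost : List (List Int)) (level : Int) (stop_level : Option Int) (item : Int) : Decidable (Pre_BestBasis_rec cost level stop_level item) := by unfold Pre_BestBasis_rec pvCellOK; infer_instance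

def pvWitness_BestBasis_rec : List (List Int) × Int × Option Int × Int := ([[1], [2, 3]], 0, none, 0)

def Spec_BestBasis_rec (cost : List (List Int)) (level : Int) (stop_level : Option Int) (item : Int) (out : Int × List Int × List Int) : Prop := out = BestBasis_rec_alt cost level stop_level item
instance (cost : List (List Int)) (level : Int) (stop_level : Option Int) (item : Int) (out : Int × List Int × List Int) : Decidable (Spec_BestBasis_rec cost level stop_level item out) := by unfold Spec_BestBasis_rec; infer_instance

-- ===== CLAIM (what is proved, stated in full; the proofs are below) =====
def Claim_equal_BestBasis_rec : Prop := ∀ (cost : List (List Int)) (level : Int) (stop_level : Option Int) (item : Int), Dom_BestBasis_rec cost level stop_level item → Pre_BestBasis_rec cost level stop_level item → Spec_BestBasis_rec cost level stop_level item (BestBasis_rec cost level stop_level item)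

-- ===== LEMMAS AND PROOFS =====

-- A's re-clamping of an already clamped stop is the identity, so an unfolding of A at an
-- arbitrary node (L, idx) with stop_level = some stop (stop ≤ len-1) reads:
theorem A_unfold_leaf (cost : List (List Int)) (L idx stop : Int)
    (hstop : stop ≤ (cost.length : Int) - 1) (h : L ≥ stop) :
    BestBasis_rec cost L (some stop) idx = (pvCell cost L idx, [L], [idx]) := by
  rw [BestBasis_rec]
  have : min ((cost.length : Int) - 1) stop = stop := by omega
  simp only [this, ge_iff_le, if_pos h]

theorem A_unfold_node (cost : List (List Int)) (L idx stop : Int)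
    (hstop : stop ≤ (cost.length : Int) - 1) (h : ¬ L ≥ stop) :
    BestBasis_rec cost L (some stop) idx =
      (let l := BestBasis_rec cost (L + 1) (some stop) (2 * idx)
       let r := BestBasis_rec cost (L + 1) (some stop) (2 * idx + 1)
       if l.1 + r.1 > pvCell cost L idx then (l.1 + r.1, l.2.1 ++ r.2.1, l.2.2 ++ r.2.2)
       else (pvCell cost L idx, [L], [idx])) := by
  rw [BestBasis_rec]
  have : min ((cost.length : Int) - 1) stop = stop := by omega
  simp only [this, ge_iff_le, if_neg h]

-- Invariant: row L of B's table is exactly the list of A's results at the nodes of level L.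
theorem pvRow_eq (cost : List (List Int)) (level item stop : Int)
    (hstop : stop ≤ (cost.length : Int) - 1) :
    ∀ (d : Nat) (L : Int), L = stop - (d : Int) → level ≤ L →
    pvRow cost level item stop L =
      (List.range (2 ^ (L - level).toNat)).map
        (fun (j : Nat) => BestBasis_rec cost L (some stop) (2 ^ (L - level).toNat * item + (j : Int))) := by
  intro d
  induction d with
  | zero =>
    intro L hL hlev
    have hge : L ≥ stop := by omega
    rw [pvRow.eq_def]
    simp only [if_pos hge]
    have hLs : L = stop := by omega
    rw [hLs]
    apply List.map_congr_left
    intro k hk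
    rw [A_unfold_leaf cost stop _ stop hstop (le_refl _)]
  | succ d ih =>
    intro L hL hlev
    by_cases hge : L ≥ stop
    · -- only reachable when d made stop - L negative… actually L = stop - (d+1) < stop, contradiction
      omega
    · rw [pvRow.eq_def]
      simp only [if_neg hge]
      rw [ih (L + 1) (by omega) (by omega)]
      have hlen : ((List.range (2 ^ (L + 1 - level).toNat)).map
          (fun (j : Nat) => BestBasis_rec cost (L + 1) (some stop) (2 ^ (L + 1 - level).toNat * item + (j : Int)))).length
          = 2 ^ (L + 1 - level).toNat := by simp
      have he1 : (L + 1 - level).toNat = (L - level).toNat + 1 := by omega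
      rw [hlen, he1]
      have hdiv : 2 ^ ((L - level).toNat + 1) / 2 = 2 ^ (L - level).toNat := by
        rw [pow_succ]; omega
      rw [hdiv]
      apply List.map_congr_left
      intro j hj
      simp only [List.mem_range] at hj
      set e := (L - level).toNat with hedef
      have hg1 : 2 * j < 2 ^ (e + 1) := by rw [pow_succ]; omega
      have hg2 : 2 * j + 1 < 2 ^ (e + 1) := by rw [pow_succ]; omega
      rw [List.getD_eq_getElem?_getD, List.getD_eq_getElem?_getD]
      rw [List.getElem?_map, List.getElem?_map, List.getElem?_range hg1, List.getElem?_range hg2]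
      simp only [Option.map_some, Option.getD_some]
      rw [A_unfold_node cost L (2 ^ e * item + (j : Int)) stop hstop hge]
      have harg1 : 2 ^ (e + 1) * item + ((2 * j : Nat) : Int) = 2 * (2 ^ e * item + (j : Int)) := by
        push_cast [pow_succ]; ring
      have harg2 : 2 ^ (e + 1) * item + ((2 * j + 1 : Nat) : Int) = 2 * (2 ^ e * item + (j : Int)) + 1 := by
        push_cast [pow_succ]; ring
      rw [harg1, harg2]

-- A re-reads min(len-1, ·) at every call; re-clamping is the identity:
theorem A_reclamp (cost : List (List Int)) (level item s : Int) :
    BestBasis_rec cost level (some s) item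
      = BestBasis_rec cost level (some (min ((cost.length : Int) - 1) s)) item := by
  rw [BestBasis_rec.eq_def, BestBasis_rec.eq_def]
  have : min ((cost.length : Int) - 1) (min ((cost.length : Int) - 1) s)
      = min ((cost.length : Int) - 1) s := by omega
  simp only [this]

theorem alt_node (cost : List (List Int)) (level item stop : Int)
    (hstop : stop ≤ (cost.length : Int) - 1) (hge : ¬ level ≥ stop) :
    (pvRow cost level item stop level).headD (0, [], [])
      = BestBasis_rec cost level (some stop) item := by
  rw [pvRow_eq cost level item stop hstop (stop - level).toNat level (by omega) (le_refl _)]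
  have he : (level - level).toNat = 0 := by omega
  rw [he]
  norm_num

-- ===== VERDICT (by name: the statement is the Claim_ definition above) =====
theorem BestBasis_rec_spec : Claim_equal_BestBasis_rec := by
  intro cost level stop_level item _ _
  unfold Spec_BestBasis_rec BestBasis_rec_alt
  cases stop_level with
  | none =>
    simp only []
    by_cases hge : level ≥ (cost.length : Int) - 1
    · rw [BestBasis_rec.eq_def]
      simp only [ge_iff_le, if_pos hge]
    · simp only [if_neg hge]
      rw [alt_node cost level item ((cost.length : Int) - 1) (le_refl _) hge]
      rw [BestBasis_rec.eq_def, BestBasis_rec.eq_def]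
      have : min ((cost.length : Int) - 1) ((cost.length : Int) - 1)
          = (cost.length : Int) - 1 := by omega
      simp only [this]
  | some s =>
    simp only []
    by_cases hge : level ≥ min ((cost.length : Int) - 1) s
    · rw [BestBasis_rec.eq_def]
      simp only [ge_iff_le, if_pos hge]
    · simp only [if_neg hge]
      rw [alt_node cost level item (min ((cost.length : Int) - 1) s) (by omega) hge]
      exact A_reclamp cost level item s
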